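-- pv_equiv track=rewrite | github.com/Get-JuanJose/esp32-lm35-predict | cloudData.py | now
-- ===== SOURCE A (Python) =====
-- def now(e):
--     i=0
--     tiempo = ""
--     for elemento in e:
--         if(i>=3 and i<6):
--             if(i==3):
--                 tiempo += str(elemento)
--             else:
--                 tiempo += ":"
--                 tiempo += str(elemento)
--         i = i+1
--     return tiempo
-- ===== SOURCE B (Python) =====
-- def now(e):
--     return ":".join(str(x) for x in e[3:6])
-- ===== Notes on version B (the rewrite author's own statement) =====
-- stated objective: idiomatic
-- what changed: Replaces the manual counter loop with first-element-vs-rest branching by the slice e[3:6] and str.join, which places the separators; B never scans past index 6.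
import Mathlib
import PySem

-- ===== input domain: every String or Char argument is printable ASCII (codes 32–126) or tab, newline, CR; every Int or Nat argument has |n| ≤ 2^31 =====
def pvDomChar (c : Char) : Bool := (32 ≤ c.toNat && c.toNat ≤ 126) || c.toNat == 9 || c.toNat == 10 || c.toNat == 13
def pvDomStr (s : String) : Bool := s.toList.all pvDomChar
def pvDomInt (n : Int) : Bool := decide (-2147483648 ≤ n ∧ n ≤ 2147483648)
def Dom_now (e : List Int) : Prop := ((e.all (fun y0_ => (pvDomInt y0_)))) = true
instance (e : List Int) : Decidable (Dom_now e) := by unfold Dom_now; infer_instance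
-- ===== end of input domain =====

-- B replaces A's counter loop and first-vs-rest branch by a slice e[3:6] and ":".join (idiomatic).
-- ===== PORT A =====
def now (e : List Int) : String :=
  (e.foldl
    (fun (st : Int × String) elemento =>
      let i := st.1
      let tiempo := st.2
      let tiempo :=
        if i ≥ 3 ∧ i < 6 then
          if i = 3 then tiempo ++ PySem.Int.toStr elemento
          else (tiempo ++ ":") ++ PySem.Int.toStr elemento
        else tiempo
      (i + 1, tiempo))
    (0, "")).2

-- ===== PORT B =====
def now_alt (e : List Int) : String :=
  PySem.Str.join ":" ((PySem.List.slice e (some 3) (some 6)).map PySem.Int.toStr)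

-- ===== PRECONDITION & SPEC =====
def Spec_now (e : List Int) (out : String) : Prop := out = now_alt e
instance (e : List Int) (out : String) : Decidable (Spec_now e out) := by unfold Spec_now; infer_instance

-- ===== CLAIM (what is proved, stated in full; the proofs are below) =====
def Claim_equal_now : Prop := ∀ (e : List Int), Dom_now e → Spec_now e (now e)

-- ===== LEMMAS AND PROOFS =====

-- contribution of A's loop body, at char level, starting at counter i
def emitC (i : Int) : List Int → List Char
  | [] => []
  | x :: xs =>
      (if i ≥ 3 ∧ i < 6 then
         if i = 3 then PySem.Int.toChars x else ':' :: PySem.Int.toChars x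
       else []) ++ emitC (i + 1) xs

theorem foldA_toList (xs : List Int) (i : Int) (t : String) :
    ((xs.foldl
      (fun (st : Int × String) elemento =>
        let i := st.1
        let tiempo := st.2
        let tiempo :=
          if i ≥ 3 ∧ i < 6 then
            if i = 3 then tiempo ++ PySem.Int.toStr elemento
            else (tiempo ++ ":") ++ PySem.Int.toStr elemento
          else tiempo
        (i + 1, tiempo)) (i, t)).2).toList = t.toList ++ emitC i xs := by
  induction xs generalizing i t with
  | nil => simp [emitC]
  | cons x xs ih =>
      simp only [List.foldl_cons, emitC]
      split_ifs <;> simp [ih, PySem.Int.toList_toStr, List.append_assoc]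

theorem emitC_ge6 (xs : List Int) (i : Int) (h : 6 ≤ i) : emitC i xs = [] := by
  induction xs generalizing i with
  | nil => rfl
  | cons x xs ih =>
      simp only [emitC]
      rw [if_neg (by omega), ih (i + 1) (by omega)]
      rfl

theorem emitC_zero (e : List Int) :
    emitC 0 e = PySem.Chars.join [':'] (((e.drop 3).take 3).map PySem.Int.toChars) := by
  match e with
  | [] => rfl
  | [a] => simp [emitC]
  | [a, b] => simp [emitC]
  | [a, b, c] => simp [emitC]
  | [a, b, c, d] =>
      simp [emitC, PySem.Chars.join_singleton]
  | [a, b, c, d, x] =>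
      simp [emitC, PySem.Chars.join_cons_cons, PySem.Chars.join_singleton]
  | a :: b :: c :: d :: x :: y :: r =>
      simp [emitC, emitC_ge6 r 6 le_rfl,
        PySem.Chars.join_cons_cons, PySem.Chars.join_singleton]

-- ===== VERDICT (by name: the statement is the Claim_ definition above) =====
theorem now_spec : Claim_equal_now := by
  intro e _
  unfold Spec_now now now_alt
  rw [← String.toList_inj]
  rw [foldA_toList, PySem.Str.toList_join,
    PySem.List.slice_toNat e (by norm_num) (by norm_num)]
  simp only [String.toList_empty, List.nil_append, List.map_map]
  have h63 : (6 : Int).toNat - (3 : Int).toNat = 3 := by decide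
  have h3 : (3 : Int).toNat = 3 := by decide
  rw [h63, h3, emitC_zero]
  have hc : (":" : String).toList = [':'] := rfl
  rw [hc]
  congr 1
  exact List.map_congr_left (fun n _ => by
    simp [PySem.Int.toList_toStr])
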